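-- pv_equiv track=rewrite | github.com/Mrzhouxf/Master_code | model_interface/function.py | update_pareto_set
-- ===== SOURCE A (Python) =====
-- def is_dominated(solution1, solution2):
--         """
--         判断solution1是否被solution2支配
--         :param solution1: 第一个解
--         :param solution2: 第二个解
--         :return: 如果solution1被solution2支配,返回True,否则返回False
--         """
--         # 检查solution2是否在所有指标上都优于solution1
--         # for i in range(len(solution1)):
--         if (solution2[0] <= solution1[0] and
--             solution2[1] <= solution1[1] and
--             solution2[2] <= solution1[2]):
--             # 至少有一个指标更优
--             if (solution2[0] < solution1[0] or
--                 solution2[1] < solution1[1] or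
--                 solution2[2] < solution1[2]):
--                 return True
--         return False
--
-- def update_pareto_set(new_solution, pareto_set):
--     """
--     更新帕累托最优解集
--     :param new_solution: 新计算出的解（字典形式，包含三个指标）
--     :param pareto_set: 当前的帕累托最优解集（列表形式）
--     :return: 更新后的帕累托最优解集
--     """
--     # 检查新解是否被现有解集中的解支配
--     dominated_by_existing = False
--
--     if len(pareto_set)==0:
--         pareto_set.append(new_solution)
--         return pareto_set
--     else:
--         # filtered_data = [item for item in pareto_set if item[2] == resource]
--         for solution in pareto_set:
--             # if solution[2] == resource:
--                 if is_dominated(new_solution, solution):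
--                     dominated_by_existing = True
--                     break
--             # else:
--             #     continue
--
--         if not dominated_by_existing:
--             # 移除被新解支配的解
--             new_pareto_set = []
--             for solution in pareto_set:
--                 # if solution[2] == resource:
--                     if not is_dominated(solution, new_solution):
--                         new_pareto_set.append(solution)
--                 # else:
--                 #     continue
--             new_pareto_set.append(new_solution)
--             return new_pareto_set
--         else:
--             return pareto_set
-- ===== SOURCE B (Python) =====
-- def _merge(new, rest):
--     # None  -> new is dominated by some element of rest (caller keeps the old set)
--     # list  -> the elements of rest not dominated by new, followed by new itself
--     if not rest:
--         return [new]
--     s = rest[0]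
--     if all(x <= y for x, y in zip(s, new)) and tuple(s) != tuple(new):
--         return None                       # s dominates new: abort immediately
--     tail = _merge(new, rest[1:])
--     if tail is None:
--         return None
--     if all(x <= y for x, y in zip(new, s)) and tuple(new) != tuple(s):
--         return tail                       # new dominates s: drop s
--     return [s] + tail
--
--
-- def update_pareto_set(new_solution, pareto_set):
--     if len(pareto_set) == 0:
--         pareto_set.append(new_solution)
--         return pareto_set
--     merged = _merge(new_solution, pareto_set)
--     return pareto_set if merged is None else merged
-- ===== Notes on version B (the rewrite author's own statement) =====
-- stated objective: alternative
-- what changed: Replaces A's two iterative scans (early-break dominance check, then a filter pass plus append) with one structural recursion that short-circuits via None when the new solution is dominated and otherwise builds the survivor list by consing, with dominance re-expressed as componentwise <= plus tuple inequality.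
import Mathlib
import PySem

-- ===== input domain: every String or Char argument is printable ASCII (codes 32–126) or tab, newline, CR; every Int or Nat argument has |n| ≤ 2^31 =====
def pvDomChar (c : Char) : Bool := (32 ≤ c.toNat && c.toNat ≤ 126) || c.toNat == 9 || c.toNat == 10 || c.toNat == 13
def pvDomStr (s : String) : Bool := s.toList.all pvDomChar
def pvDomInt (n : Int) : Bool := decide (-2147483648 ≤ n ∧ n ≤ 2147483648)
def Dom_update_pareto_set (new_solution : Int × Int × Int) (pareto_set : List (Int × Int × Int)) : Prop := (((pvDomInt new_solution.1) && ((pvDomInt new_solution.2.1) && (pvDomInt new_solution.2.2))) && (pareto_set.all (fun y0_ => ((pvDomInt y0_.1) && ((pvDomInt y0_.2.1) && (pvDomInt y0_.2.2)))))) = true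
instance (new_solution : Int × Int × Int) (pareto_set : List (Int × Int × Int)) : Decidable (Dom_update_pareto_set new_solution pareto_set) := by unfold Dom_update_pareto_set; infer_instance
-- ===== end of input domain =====

-- B replaces A's two iterative scans with one structural recursion that short-circuits via Option
-- when the new solution is dominated and otherwise conses up the survivor list; both A and B mutate
-- pareto_set (append) only in the empty case — equivalence here is about the return value.


-- ===== PORT A =====
def is_dominated (s1 s2 : Int × Int × Int) : Bool :=
  if s2.1 ≤ s1.1 ∧ s2.2.1 ≤ s1.2.1 ∧ s2.2.2 ≤ s1.2.2 then
    if s2.1 < s1.1 ∨ s2.2.1 < s1.2.1 ∨ s2.2.2 < s1.2.2 then true else false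
  else false

-- A's first loop: early-break scan for a dominating existing solution
def aDominatedBy (new_solution : Int × Int × Int) : List (Int × Int × Int) → Bool
  | [] => false
  | s :: rest => if is_dominated new_solution s then true else aDominatedBy new_solution rest

-- A's second loop: keep solutions not dominated by the new one
def aFilter (new_solution : Int × Int × Int) : List (Int × Int × Int) → List (Int × Int × Int)
  | [] => []
  | s :: rest =>
      if !is_dominated s new_solution then s :: aFilter new_solution rest
      else aFilter new_solution rest

def update_pareto_set (new_solution : Int × Int × Int) (pareto_set : List (Int × Int × Int)) : List (Int × Int × Int) :=
  if pareto_set.length = 0 then pareto_set ++ [new_solution]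
  else if !aDominatedBy new_solution pareto_set then
    aFilter new_solution pareto_set ++ [new_solution]
  else pareto_set

-- ===== PORT B =====
-- Source B's dominance test: componentwise ≤ (the all/zip) and tuple inequality
def bDominates (p q : Int × Int × Int) : Bool :=
  (p.1 ≤ q.1 && p.2.1 ≤ q.2.1 && p.2.2 ≤ q.2.2) && !(p == q)

-- Source B's _merge: none ⇒ new is dominated somewhere (short-circuit); some ⇒ survivors ++ [new]
def bMerge (nw : Int × Int × Int) : List (Int × Int × Int) → Option (List (Int × Int × Int))
  | [] => some [nw]
  | s :: rest =>
      if bDominates s nw then none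
      else
        match bMerge nw rest with
        | none => none
        | some tail => some (if bDominates nw s then tail else [s] ++ tail)

def update_pareto_set_alt (new_solution : Int × Int × Int) (pareto_set : List (Int × Int × Int)) : List (Int × Int × Int) :=
  if pareto_set.length = 0 then pareto_set ++ [new_solution]
  else
    match bMerge new_solution pareto_set with
    | none => pareto_set
    | some merged => merged

-- ===== PRECONDITION & SPEC =====
def Spec_update_pareto_set (new_solution : Int × Int × Int) (pareto_set : List (Int × Int × Int)) (out : List (Int × Int × Int)) : Prop := out = update_pareto_set_alt new_solution pareto_set
instance (new_solution : Int × Int × Int) (pareto_set : List (Int × Int × Int)) (out : List (Int × Int × Int)) : Decidable (Spec_update_pareto_set new_solution pareto_set out) := by unfold Spec_update_pareto_set; infer_instance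

-- ===== CLAIM (what is proved, stated in full; the proofs are below) =====
def Claim_equal_update_pareto_set : Prop := ∀ (new_solution : Int × Int × Int) (pareto_set : List (Int × Int × Int)), Dom_update_pareto_set new_solution pareto_set → Spec_update_pareto_set new_solution pareto_set (update_pareto_set new_solution pareto_set)

-- ===== LEMMAS AND PROOFS =====
-- Source B's "componentwise ≤ and not equal" test agrees with A's "≤ everywhere, < somewhere" test
lemma bDominates_eq (a b : Int × Int × Int) : bDominates b a = is_dominated a b := by
  rcases a with ⟨a1, a2, a3⟩
  rcases b with ⟨b1, b2, b3⟩
  simp only [bDominates, is_dominated]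
  split_ifs with h1 h2 <;>
    simp only [Bool.and_eq_true, Bool.and_eq_false_iff, decide_eq_true_eq, decide_eq_false_iff_not,
      Bool.not_eq_true', Bool.not_eq_false', beq_eq_false_iff_ne, beq_iff_eq, ne_eq, Prod.mk.injEq] <;>
    omega

lemma bMerge_eq (nw : Int × Int × Int) (ps : List (Int × Int × Int)) :
    bMerge nw ps = if aDominatedBy nw ps then none else some (aFilter nw ps ++ [nw]) := by
  induction ps with
  | nil => simp [bMerge, aDominatedBy, aFilter]
  | cons s rest ih =>
      simp only [bMerge, aDominatedBy, aFilter, ih, bDominates_eq]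
      by_cases h : is_dominated nw s
      · simp [h]
      · by_cases h2 : aDominatedBy nw rest
        · simp [h, h2]
        · by_cases h3 : is_dominated s nw <;> simp [h, h2, h3]

-- ===== VERDICT (by name: the statement is the Claim_ definition above) =====
theorem update_pareto_set_spec : Claim_equal_update_pareto_set := by
  intro ns ps _
  show update_pareto_set ns ps = update_pareto_set_alt ns ps
  unfold update_pareto_set update_pareto_set_alt
  by_cases hlen : ps.length = 0
  · simp [hlen]
  · simp only [hlen, if_false, bMerge_eq]
    by_cases hd : aDominatedBy ns ps <;> simp [hd]
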